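-- pv_equiv track=rewrite | github.com/sokolov-group/sqa_plus | sqaIntermediates.py | make_names
-- ===== SOURCE A (Python) =====
-- def make_names(name_list):
--
--     # Make unique value for each name
--     unicode_names = []
--     for n in name_list:
--         p = 0
--
--         for l in range(len(n)):
--             p *= 255
--             p += ord(n[l])
--
--         unicode_names.append(p)
--
--     return unicode_names
-- ===== SOURCE B (Python) =====
-- def make_names(name_list):
--     # Direct positional polynomial evaluation instead of a Horner accumulator.
--     return [sum(ord(c) * 255 ** (len(n) - 1 - i) for i, c in enumerate(n))
--             for n in name_list]
-- ===== Notes on version B (the rewrite author's own statement) =====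
-- stated objective: alternative
-- what changed: Replaces the Horner-style running accumulator (p = p*255 + ord(c), appended in an explicit loop) with direct polynomial evaluation: a comprehension summing ord(c) * 255**(len(n)-1-i) over enumerate(n).
import Mathlib
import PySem

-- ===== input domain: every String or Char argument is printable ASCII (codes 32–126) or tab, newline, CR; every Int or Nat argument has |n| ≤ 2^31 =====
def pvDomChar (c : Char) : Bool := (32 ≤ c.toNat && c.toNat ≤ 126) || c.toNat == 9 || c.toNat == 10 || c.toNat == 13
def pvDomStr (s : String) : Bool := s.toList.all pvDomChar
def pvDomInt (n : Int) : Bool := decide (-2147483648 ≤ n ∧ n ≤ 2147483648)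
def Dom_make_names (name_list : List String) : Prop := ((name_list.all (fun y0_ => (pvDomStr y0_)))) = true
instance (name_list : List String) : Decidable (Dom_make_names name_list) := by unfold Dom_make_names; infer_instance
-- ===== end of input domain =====

-- B evaluates each name's base-255 value as an explicit power sum instead of A's Horner accumulator loop.


-- ===== PORT A =====
-- inner loop: p = 0; for l in range(len(n)): p *= 255; p += ord(n[l])
-- (iterating n[0], n[1], … in order = folding over n.toList)
def make_names_horner (n : String) : Int :=
  n.toList.foldl (fun p c => p * 255 + (c.toNat : Int)) 0

-- outer loop: unicode_names = []; for n in name_list: …; unicode_names.append(p)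
def make_names (name_list : List String) : List Int :=
  name_list.foldl (fun acc n => acc ++ [make_names_horner n]) []

-- ===== PORT B =====
def make_names_powsum (n : String) : Int :=
  ((PySem.List.enumerate n.toList 0).map
    (fun ic => (ic.2.toNat : Int) * (255 : Int) ^ (((n.length : Int) - 1 - ic.1).toNat))).sum

def make_names_alt (name_list : List String) : List Int :=
  name_list.map make_names_powsum

-- ===== PRECONDITION & SPEC =====
def Spec_make_names (name_list : List String) (out : List Int) : Prop := out = make_names_alt name_list
instance (name_list : List String) (out : List Int) : Decidable (Spec_make_names name_list out) := by unfold Spec_make_names; infer_instance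

-- ===== CLAIM (what is proved, stated in full; the proofs are below) =====
def Claim_equal_make_names : Prop := ∀ (name_list : List String), Dom_make_names name_list → Spec_make_names name_list (make_names name_list)

-- ===== LEMMAS AND PROOFS =====

-- Horner shift: folding from a is a*255^len plus folding from 0
theorem horner_shift (l : List Char) (a : Int) :
    l.foldl (fun p c => p * 255 + (c.toNat : Int)) a
      = a * 255 ^ l.length + l.foldl (fun p c => p * 255 + (c.toNat : Int)) 0 := by
  induction l generalizing a with
  | nil => simp
  | cons c t ih =>
    simp only [List.foldl_cons, List.length_cons]
    rw [ih (a * 255 + (c.toNat : Int)), ih ((0 : Int) * 255 + (c.toNat : Int))]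
    ring

-- power sum over enumerate with start s equals the Horner value, when L = s + len
theorem powsum_eq_horner (l : List Char) : ∀ (s L : Nat), L = s + l.length →
    ((PySem.List.enumerate l (s : Int)).map
      (fun ic => (ic.2.toNat : Int) * (255 : Int) ^ (((L : Int) - 1 - ic.1).toNat))).sum
      = l.foldl (fun p c => p * 255 + (c.toNat : Int)) 0 := by
  induction l with
  | nil => intro s L h; simp [PySem.List.enumerate_nil]
  | cons c t ih =>
    intro s L h
    rw [PySem.List.enumerate_cons]
    simp only [List.map_cons, List.sum_cons, List.foldl_cons]
    have hs : ((s : Int) + 1) = ((s + 1 : Nat) : Int) := by push_cast; ring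
    rw [hs, ih (s + 1) L (by simp [h, List.length_cons]; omega)]
    have he : (((L : Int) - 1 - (s : Int)).toNat) = t.length := by
      simp [h, List.length_cons]; omega
    rw [he, horner_shift t ((0 : Int) * 255 + (c.toNat : Int))]
    ring

theorem horner_eq_powsum (n : String) : make_names_horner n = make_names_powsum n := by
  unfold make_names_horner make_names_powsum
  simpa using (powsum_eq_horner n.toList 0 n.length (by simp)).symm

theorem foldl_append_singleton {α β : Type} (g : α → β) (l : List α) (acc : List β) :
    l.foldl (fun a n => a ++ [g n]) acc = acc ++ l.map g := by
  induction l generalizing acc with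
  | nil => simp
  | cons x t ih => simp [ih]

-- ===== VERDICT (by name: the statement is the Claim_ definition above) =====
theorem make_names_spec : Claim_equal_make_names := by
  intro name_list _
  unfold Spec_make_names make_names make_names_alt
  rw [foldl_append_singleton make_names_horner name_list []]
  simp [horner_eq_powsum]
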